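-- pv_equiv track=rewrite | github.com/richard-mck/adventofcode2023 | dec_14/dec_14.py | move_rocks_as_strings
-- ===== SOURCE A (Python) =====
-- def move_rocks_as_strings(puzzle: list[str]) -> list[str]:
--     # Assuming initially we are always only moving things north
--     # Assuming also that puzzle is unmodified
--     updated_puzzle = puzzle.copy()
--     return_puzzle = []
--     for i in range(len(updated_puzzle)):
--         # Find fixed rocks to be reinserted later
--         fixed_rocks = [
--             j for j in range(len(updated_puzzle[i])) if updated_puzzle[i][j] == "#"
--         ]
--         # Remove the fixed rocks so we can collapse the mobile rocks within a row
--         new_rows = updated_puzzle[i].split("#")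
--         updated_row = ""
--         for row in new_rows:
--             rock_count = row.count("O")
--             updated_row = (
--                 updated_row + "O" * rock_count + ("." * (len(row) - rock_count))
--             )
--         # Reinserted the fixed rocks
--         for rock in fixed_rocks:
--             updated_row = updated_row[:rock] + "#" + updated_row[rock:]
--         return_puzzle.append(updated_row)
--     return return_puzzle
-- ===== SOURCE B (Python) =====
-- def move_rocks_as_strings(puzzle: list[str]) -> list[str]:
--     # One left-to-right pass per row: count 'O's and other chars per '#'-segment,
--     # emit each segment as O's then dots, join pieces at the end.
--     result = []
--     for row in puzzle:
--         pieces = []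
--         o = d = 0
--         for ch in row:
--             if ch == "#":
--                 pieces.append("O" * o + "." * d + "#")
--                 o = d = 0
--             elif ch == "O":
--                 o += 1
--             else:
--                 d += 1
--         pieces.append("O" * o + "." * d)
--         result.append("".join(pieces))
--     return result
-- ===== Notes on version B (the rewrite author's own statement) =====
-- stated objective: faster
-- what changed: Replaces A's three staged passes per row (index scan for '#', split on '#' with per-segment count, then per-rock string slicing reinsertion, quadratic in row length) by a single left-to-right pass with two counters that emits each segment directly, joined once.
import Mathlib
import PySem

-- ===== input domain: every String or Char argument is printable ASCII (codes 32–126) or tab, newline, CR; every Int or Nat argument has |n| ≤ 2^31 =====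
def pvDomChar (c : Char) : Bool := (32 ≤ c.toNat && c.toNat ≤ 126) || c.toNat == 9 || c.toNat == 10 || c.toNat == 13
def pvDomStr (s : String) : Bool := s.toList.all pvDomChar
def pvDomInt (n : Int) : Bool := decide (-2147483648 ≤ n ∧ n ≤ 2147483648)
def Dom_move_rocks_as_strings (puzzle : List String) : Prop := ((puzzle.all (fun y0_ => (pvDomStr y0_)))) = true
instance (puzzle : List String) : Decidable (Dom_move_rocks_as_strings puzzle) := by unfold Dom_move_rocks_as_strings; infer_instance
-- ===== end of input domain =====

-- B replaces A's three staged passes per row (index scan for '#', split on '#', per-rock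
-- slicing reinsertion) by a single left-to-right counting pass per row; return values agree.

-- ===== PORT A =====
-- A, per row: indices of '#', split on '#', collapse each piece to O's-then-dots, then
-- reinsert '#' by string slicing at each recorded index.
def pvARow (row : List Char) : List Char :=
  let fixed_rocks : List Int :=
    (PySem.List.pyRange 0 (row.length : Int) 1).filter
      (fun j => PySem.List.pyGetD row j ' ' == '#')
  let new_rows : List (List Char) := PySem.Chars.splitOn row ['#']
  let updated_row : List Char :=
    new_rows.foldl
      (fun ur r =>
        let rock_count := PySem.Chars.count r ['O']
        ur ++ List.replicate rock_count 'O' ++ List.replicate (r.length - rock_count) '.')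
      []
  fixed_rocks.foldl
    (fun ur rock => PySem.List.slice ur none (some rock) ++ '#' :: PySem.List.slice ur (some rock) none)
    updated_row

def move_rocks_as_strings (puzzle : List String) : List String :=
  (PySem.List.pyRange 0 (puzzle.length : Int) 1).foldl
    (fun ret i => ret ++ [String.ofList (pvARow (PySem.List.pyGetD puzzle i "").toList)]) []

-- ===== PORT B =====
-- B, per row: one pass with counters (pieces, o, d); '#' flushes a piece, join at the end.
def pvBStep (st : List (List Char) × Nat × Nat) (ch : Char) : List (List Char) × Nat × Nat :=
  if ch == '#' then
    (st.1 ++ [List.replicate st.2.1 'O' ++ List.replicate st.2.2 '.' ++ ['#']], 0, 0)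
  else if ch == 'O' then (st.1, st.2.1 + 1, st.2.2)
  else (st.1, st.2.1, st.2.2 + 1)

def pvBRow (row : List Char) : List Char :=
  let st := row.foldl pvBStep ([], 0, 0)
  PySem.Chars.join [] (st.1 ++ [List.replicate st.2.1 'O' ++ List.replicate st.2.2 '.'])

def move_rocks_as_strings_alt (puzzle : List String) : List String :=
  puzzle.foldl (fun result row => result ++ [String.ofList (pvBRow row.toList)]) []

-- ===== PRECONDITION & SPEC =====
def Spec_move_rocks_as_strings (puzzle : List String) (out : List String) : Prop := out = move_rocks_as_strings_alt puzzle
instance (puzzle : List String) (out : List String) : Decidable (Spec_move_rocks_as_strings puzzle out) := by unfold Spec_move_rocks_as_strings; infer_instance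

-- ===== CLAIM (what is proved, stated in full; the proofs are below) =====
def Claim_equal_move_rocks_as_strings : Prop := ∀ (puzzle : List String), Dom_move_rocks_as_strings puzzle → Spec_move_rocks_as_strings puzzle (move_rocks_as_strings puzzle)

-- ===== LEMMAS AND PROOFS =====

-- Reference split of a row at '#' (clean structural recursion used only in the proofs)
def pvSplit : List Char → List (List Char)
  | [] => [[]]
  | c :: rest =>
    if c = '#' then [] :: pvSplit rest
    else
      match pvSplit rest with
      | [] => [[c]]
      | p :: ps => (c :: p) :: ps

lemma pvSplit_ne_nil (l : List Char) : pvSplit l ≠ [] := by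
  induction l with
  | nil => simp [pvSplit]
  | cons c rest ih =>
    simp only [pvSplit]
    split_ifs
    · simp
    · cases h : pvSplit rest <;> simp

lemma splitOn_go_eq (l : List Char) : ∀ (fuel : Nat) (cur : List Char) (acc : List (List Char)),
    l.length ≤ fuel →
    PySem.Chars.splitOn.go ['#'] fuel l cur acc
      = acc.reverse ++ (pvSplit l).modifyHead (cur.reverse ++ ·) := by
  induction l with
  | nil =>
    intro fuel cur acc _
    cases fuel <;> simp [PySem.Chars.splitOn.go, pvSplit]
  | cons c rest ih =>
    intro fuel cur acc hf
    cases fuel with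
    | zero => simp at hf
    | succ f =>
      simp only [PySem.Chars.splitOn.go]
      by_cases hc : c = '#'
      · subst hc
        rw [if_pos (by simp)]
        simp only [List.length_cons, List.drop_succ_cons, List.length_nil, List.drop_zero]
        rw [ih f [] (cur.reverse :: acc) (by simpa using hf)]
        simp only [pvSplit, List.reverse_cons, List.append_assoc, List.reverse_nil,
          List.nil_append, List.singleton_append]
        cases pvSplit rest <;> simp
      · rw [if_neg (by simp [List.isPrefixOf, Ne.symm hc])]
        rw [ih f (c :: cur) acc (by simpa using hf)]
        simp only [pvSplit, if_neg hc]
        cases h : pvSplit rest with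
        | nil => exact absurd h (pvSplit_ne_nil rest)
        | cons p ps => simp

lemma splitOn_eq_pvSplit (l : List Char) : PySem.Chars.splitOn l ['#'] = pvSplit l := by
  rw [PySem.Chars.splitOn, splitOn_go_eq l (l.length + 1) [] [] (by omega)]
  cases h : pvSplit l with
  | nil => exact absurd h (pvSplit_ne_nil l)
  | cons p ps => simp

lemma count_go_eq (c : Char) (l : List Char) : ∀ (fuel : Nat) (acc : Nat),
    l.length ≤ fuel →
    PySem.Chars.count.go [c] fuel l acc = acc + l.count c := by
  induction l with
  | nil => intro fuel acc _; cases fuel <;> simp [PySem.Chars.count.go]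
  | cons x rest ih =>
    intro fuel acc hf
    cases fuel with
    | zero => simp at hf
    | succ f =>
      simp only [PySem.Chars.count.go]
      by_cases hx : x = c
      · subst hx
        rw [if_pos (by simp)]
        simp only [List.length_cons, List.drop_succ_cons, List.length_nil, List.drop_zero]
        rw [ih f (acc + 1) (by simpa using hf)]
        simp
        omega
      · rw [if_neg (by simp [List.isPrefixOf, Ne.symm hx])]
        rw [ih f acc (by simpa using hf)]
        simp [hx]

lemma chars_count_single (c : Char) (l : List Char) :
    PySem.Chars.count l [c] = l.count c := by
  rw [PySem.Chars.count]
  simpa using count_go_eq c l l.length 0 le_rfl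

lemma join_nil_eq_flatten (l : List (List Char)) : PySem.Chars.join [] l = l.flatten := by
  simp only [PySem.Chars.join, List.intercalate]
  induction l with
  | nil => simp
  | cons x xs ih => cases xs <;> simp_all [List.intersperse]

-- sorted form of a '#'-free segment
def pvSeg (r : List Char) : List Char :=
  List.replicate (r.count 'O') 'O' ++ List.replicate (r.length - r.count 'O') '.'

lemma pvSeg_length (r : List Char) : (pvSeg r).length = r.length := by
  have := List.count_le_length (l := r) (a := 'O')
  simp [pvSeg]; omega

lemma pvSplit_no_hash (l : List Char) (h : '#' ∉ l) : pvSplit l = [l] := by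
  induction l with
  | nil => simp [pvSplit]
  | cons c rest ih =>
    simp only [List.mem_cons, not_or] at h
    simp [pvSplit, Ne.symm h.1, ih h.2]

lemma pvSplit_append (pre rest : List Char) (h : '#' ∉ pre) :
    pvSplit (pre ++ '#' :: rest) = pre :: pvSplit rest := by
  induction pre with
  | nil => simp [pvSplit]
  | cons c p ih =>
    simp only [List.mem_cons, not_or] at h
    simp only [List.cons_append, pvSplit, if_neg (Ne.symm h.1), ih h.2]

-- the natural-number '#' positions
def pvFixedN (row : List Char) : List Nat :=
  (List.range row.length).filter (fun k => row.getD k ' ' == '#')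

lemma fixed_int_eq (row : List Char) :
    (PySem.List.pyRange 0 (row.length : Int) 1).filter (fun j => PySem.List.pyGetD row j ' ' == '#')
      = (pvFixedN row).map Int.ofNat := by
  rw [PySem.List.pyRange_zero_nat, List.filter_map]
  simp only [pvFixedN, Function.comp_def, PySem.List.pyGetD_natCast]
  rfl

lemma pvFixedN_no_hash (row : List Char) (h : '#' ∉ row) : pvFixedN row = [] := by
  rw [pvFixedN, List.filter_eq_nil_iff]
  intro k hk
  simp only [List.mem_range] at hk
  simp only [beq_iff_eq, List.getD_eq_getElem _ _ hk]
  exact fun hc => h (hc ▸ List.getElem_mem hk)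

lemma pvFixedN_append (pre rest : List Char) (h : '#' ∉ pre) :
    pvFixedN (pre ++ '#' :: rest)
      = pre.length :: (pvFixedN rest).map (fun k => k + (pre.length + 1)) := by
  have hlen : (pre ++ '#' :: rest).length = (pre.length + 1) + rest.length := by
    simp; omega
  rw [pvFixedN, hlen, List.range_add, List.filter_append, List.filter_map]
  have h0 : List.filter (fun k => (pre ++ '#' :: rest).getD k ' ' == '#') (List.range pre.length) = [] := by
    rw [List.filter_eq_nil_iff]
    intro k hk
    simp only [List.mem_range] at hk
    have hk' : k < (pre ++ '#' :: rest).length := by simp; omega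
    rw [List.getD_eq_getElem _ _ hk', List.getElem_append_left hk]
    simp only [beq_iff_eq]
    exact fun hc => h (hc ▸ List.getElem_mem hk)
  have h1 : List.filter (fun k => (pre ++ '#' :: rest).getD k ' ' == '#') (List.range (pre.length + 1))
      = [pre.length] := by
    rw [List.range_succ, List.filter_append, h0]
    have hm : pre.length < (pre ++ '#' :: rest).length := by simp
    simp only [List.nil_append, List.filter_cons, List.getD_eq_getElem _ _ hm,
      List.getElem_append_right (le_refl pre.length)]
    simp
  have h2 : ∀ k ∈ List.range rest.length,
      ((pre ++ '#' :: rest).getD (pre.length + 1 + k) ' ' == '#')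
        = (rest.getD k ' ' == '#') := by
    intro k hk
    simp only [List.mem_range] at hk
    have hk' : pre.length + 1 + k < (pre ++ '#' :: rest).length := by simp; omega
    have hge : pre.length ≤ pre.length + 1 + k := by omega
    rw [List.getD_eq_getElem _ _ hk', List.getElem_append_right hge,
      List.getD_eq_getElem _ _ hk]
    congr 1
    have : pre.length + 1 + k - pre.length = k + 1 := by omega
    simp [this]
  rw [h1]
  simp only [Function.comp_def]
  rw [List.filter_congr h2]
  simp only [List.cons_append, List.nil_append, pvFixedN]
  congr 1
  exact List.map_congr_left (fun k _ => by omega)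

lemma pvCollapse_eq (rows : List (List Char)) :
    rows.foldl
      (fun ur r =>
        ur ++ List.replicate (PySem.Chars.count r ['O']) 'O'
           ++ List.replicate (r.length - PySem.Chars.count r ['O']) '.')
      []
    = (rows.map pvSeg).flatten := by
  have hstep : (fun (ur : List Char) r =>
        ur ++ List.replicate (PySem.Chars.count r ['O']) 'O'
           ++ List.replicate (r.length - PySem.Chars.count r ['O']) '.')
      = fun ur r => ur ++ pvSeg r := by
    funext ur r
    simp [pvSeg, chars_count_single, List.append_assoc]
  rw [hstep, PySem.List.foldl_append_eq_flatMap]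
  simp [List.flatMap_def]

def pvInsert (s : List Char) (ps : List Nat) : List Char :=
  ps.foldl (fun ur rock => ur.take rock ++ '#' :: ur.drop rock) s

lemma A_fold_eq_pvInsert (ps : List Nat) (s : List Char) :
    (ps.map Int.ofNat).foldl
      (fun ur rock => PySem.List.slice ur none (some rock) ++ '#' :: PySem.List.slice ur (some rock) none) s
      = pvInsert s ps := by
  unfold pvInsert
  induction ps generalizing s with
  | nil => rfl
  | cons p t ih =>
    simp only [List.map_cons, List.foldl_cons, Int.ofNat_eq_natCast,
      PySem.List.slice_to_natCast, PySem.List.slice_from_natCast]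
    exact ih _

lemma pvInsert_shift (ps : List Nat) (k : Nat) (pre s : List Char) (hp : pre.length = k) :
    pvInsert (pre ++ s) (ps.map (fun p => p + k)) = pre ++ pvInsert s ps := by
  induction ps generalizing s with
  | nil => rfl
  | cons p t ih =>
    subst hp
    simp only [List.map_cons, pvInsert, List.foldl_cons]
    have ht : (pre ++ s).take (p + pre.length) = pre ++ s.take p := by
      rw [List.take_append, List.take_of_length_le (show pre.length ≤ p + pre.length by omega)]
      have hpp : p + pre.length - pre.length = p := by omega
      rw [hpp]
    have hd : (pre ++ s).drop (p + pre.length) = s.drop p := by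
      rw [List.drop_append, List.drop_of_length_le (show pre.length ≤ p + pre.length by omega)]
      simp only [List.nil_append]
      have hpp : p + pre.length - pre.length = p := by omega
      rw [hpp]
    rw [ht, hd, List.append_assoc]
    exact ih (s.take p ++ '#' :: s.drop p)

-- B-side: the fold only ever appends to the pieces component
lemma pvBStep_pieces (row : List Char) : ∀ (pieces : List (List Char)) (o d : Nat),
    row.foldl pvBStep (pieces, o, d)
      = (pieces ++ (row.foldl pvBStep ([], o, d)).1, (row.foldl pvBStep ([], o, d)).2) := by
  induction row with
  | nil => intro pieces o d; simp
  | cons c rest ih =>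
    intro pieces o d
    simp only [List.foldl_cons]
    by_cases hc : c = '#'
    · subst hc
      rw [show pvBStep (pieces, o, d) '#'
            = (pieces ++ [List.replicate o 'O' ++ List.replicate d '.' ++ ['#']], 0, 0) from rfl,
          show pvBStep (([] : List (List Char)), o, d) '#'
            = ([List.replicate o 'O' ++ List.replicate d '.' ++ ['#']], 0, 0) from rfl]
      rw [ih (pieces ++ _) 0 0, ih [_] 0 0]
      simp
    · by_cases ho : c = 'O'
      · subst ho
        rw [show pvBStep (pieces, o, d) 'O' = (pieces, o + 1, d) from rfl,
            show pvBStep (([] : List (List Char)), o, d) 'O' = ([], o + 1, d) from rfl]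
        exact ih pieces (o + 1) d
      · have e1 : pvBStep (pieces, o, d) c = (pieces, o, d + 1) := by
          simp [pvBStep, hc, ho]
        have e2 : pvBStep (([] : List (List Char)), o, d) c = ([], o, d + 1) := by
          simp [pvBStep, hc, ho]
        rw [e1, e2]
        exact ih pieces o (d + 1)

lemma pvB_free (pre : List Char) (h : '#' ∉ pre) : ∀ (pieces : List (List Char)) (o d : Nat),
    pre.foldl pvBStep (pieces, o, d)
      = (pieces, o + pre.count 'O', d + pre.countP (fun c => c != 'O')) := by
  induction pre with
  | nil => intro pieces o d; simp
  | cons c rest ih =>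
    intro pieces o d
    simp only [List.mem_cons, not_or] at h
    simp only [List.foldl_cons]
    by_cases ho : c = 'O'
    · subst ho
      rw [show pvBStep (pieces, o, d) 'O' = (pieces, o + 1, d) from rfl]
      rw [ih h.2 pieces (o + 1) d]
      simp
      omega
    · have e1 : pvBStep (pieces, o, d) c = (pieces, o, d + 1) := by
        simp [pvBStep, Ne.symm h.1, ho]
      rw [e1, ih h.2 pieces o (d + 1)]
      simp [ho]
      omega

lemma countP_nonO (pre : List Char) : pre.countP (fun c => c != 'O') = pre.length - pre.count 'O' := by
  induction pre with
  | nil => simp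
  | cons c t ih =>
    have hle := List.count_le_length (l := t) (a := 'O')
    by_cases hc : c = 'O'
    · simp [hc, ih]
    · simp [hc, ih]
      omega

lemma pvBRow_no_hash (row : List Char) (h : '#' ∉ row) : pvBRow row = pvSeg row := by
  unfold pvBRow
  rw [pvB_free row h [] 0 0]
  show PySem.Chars.join [] _ = _
  rw [join_nil_eq_flatten]
  simp [pvSeg, countP_nonO]

lemma pvBRow_append (pre rest : List Char) (h : '#' ∉ pre) :
    pvBRow (pre ++ '#' :: rest) = pvSeg pre ++ '#' :: pvBRow rest := by
  unfold pvBRow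
  rw [List.foldl_append, pvB_free pre h [] 0 0, List.foldl_cons]
  rw [show pvBStep (([] : List (List Char)), 0 + pre.count 'O', 0 + pre.countP (fun c => c != 'O')) '#'
        = ([List.replicate (0 + pre.count 'O') 'O' ++ List.replicate (0 + pre.countP (fun c => c != 'O')) '.' ++ ['#']], 0, 0) from rfl]
  rw [pvBStep_pieces rest [_] 0 0]
  simp [join_nil_eq_flatten, pvSeg, countP_nonO, List.append_assoc]

lemma pvARow_no_hash (row : List Char) (h : '#' ∉ row) : pvARow row = pvSeg row := by
  simp only [pvARow]
  rw [fixed_int_eq, pvFixedN_no_hash row h, splitOn_eq_pvSplit, pvSplit_no_hash row h]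
  simpa using pvCollapse_eq [row]

lemma pvARow_append (pre rest : List Char) (h : '#' ∉ pre) :
    pvARow (pre ++ '#' :: rest) = pvSeg pre ++ '#' :: pvARow rest := by
  simp only [pvARow]
  rw [fixed_int_eq, pvFixedN_append pre rest h, splitOn_eq_pvSplit, pvSplit_append pre rest h,
    fixed_int_eq, splitOn_eq_pvSplit]
  rw [pvCollapse_eq, pvCollapse_eq]
  rw [A_fold_eq_pvInsert, A_fold_eq_pvInsert]
  simp only [List.map_cons, List.flatten_cons]
  rw [pvInsert, List.foldl_cons]
  have ht : (pvSeg pre ++ ((pvSplit rest).map pvSeg).flatten).take pre.length = pvSeg pre := by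
    rw [← pvSeg_length pre, List.take_left]
  have hd : (pvSeg pre ++ ((pvSplit rest).map pvSeg).flatten).drop pre.length
      = ((pvSplit rest).map pvSeg).flatten := by
    rw [← pvSeg_length pre, List.drop_left]
  rw [ht, hd, ← pvInsert]
  have : pvSeg pre ++ '#' :: ((pvSplit rest).map pvSeg).flatten
      = (pvSeg pre ++ ['#']) ++ ((pvSplit rest).map pvSeg).flatten := by simp
  rw [this, pvInsert_shift _ (pre.length + 1) _ _ (by simp [pvSeg_length])]
  simp

lemma row_eq (n : Nat) : ∀ (row : List Char), row.length ≤ n → pvARow row = pvBRow row := by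
  induction n with
  | zero =>
    intro row hr
    have : row = [] := List.eq_nil_of_length_eq_zero (by omega)
    subst this
    rw [pvARow_no_hash [] (by simp), pvBRow_no_hash [] (by simp)]
  | succ n ih =>
    intro row hr
    by_cases h : '#' ∈ row
    · have hidx : (PySem.List.index? row '#').isSome := (PySem.List.index?_isSome_iff row '#').mpr h
      obtain ⟨k, hk⟩ := Option.isSome_iff_exists.mp hidx
      obtain ⟨pre, suf, heq, hklen, hpre⟩ := (PySem.List.index?_eq_some_iff row '#' k).mp hk
      subst heq
      rw [pvARow_append pre suf hpre, pvBRow_append pre suf hpre]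
      have : suf.length ≤ n := by
        have := hr
        simp only [List.length_append, List.length_cons] at this
        omega
      rw [ih suf this]
    · rw [pvARow_no_hash row h, pvBRow_no_hash row h]

-- ===== VERDICT (by name: the statement is the Claim_ definition above) =====
theorem move_rocks_as_strings_spec : Claim_equal_move_rocks_as_strings := by
  intro puzzle _
  unfold Spec_move_rocks_as_strings move_rocks_as_strings move_rocks_as_strings_alt
  rw [PySem.List.foldl_pyRange_zero_pyGetD' puzzle ""
    (fun ret s => ret ++ [String.ofList (pvARow s.toList)]) []]
  rw [PySem.List.foldl_append_singleton_eq_map, PySem.List.foldl_append_singleton_eq_map]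
  simp only [List.nil_append]
  exact List.map_congr_left (fun s _ => by rw [row_eq s.toList.length s.toList le_rfl])
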